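-- pv_equiv track=rewrite | github.com/EHwooKim/study | React/ShoppingMall/uploads/1599808940784_pro02.py | solution
-- ===== SOURCE A (Python) =====
-- def decrease_row(location):
--   return (location[0] + 1, location[1])
--
-- def increase_col(location):
--   return (location[0], location[1] + 1)
--
-- def increase_diagonal(location):
--   return (location[0] - 1, location[1] -1)
--
-- def solution(n):
--   answer = [[0] * n for _ in range(n)]
--   count_arr = list(range(n, 0, -1))
--   now_location = (-1, 0)
--   now_value = 1
--   direction = 0
--
--   for count in count_arr:
--     while count:
--       if direction == 0:
--         now_location = decrease_row(now_location)
--       elif direction == 1: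
--         now_location = increase_col(now_location)
--       else:
--         now_location = increase_diagonal(now_location)
--       answer[now_location[0]][now_location[1]] = now_value
--       count -= 1
--       now_value += 1
--     direction = (direction + 1) % 3
--   result = []
--   for i in range(len(answer)):
--     for j in range(len(answer)):
--       if answer[i][j]:
--         result.append(answer[i][j])
--   return result
-- ===== SOURCE B (Python) =====
-- def _val(n, r, c):
--     # closed-form value of the snail triangle at 0-indexed cell (r, c), c <= r < n
--     k = min(c, r - c, n - 1 - r)          # shell (layer) of the cell
--     m = n - 3 * k                         # side of that shell's triangle
--     s = 1 + 3 * k * (n - 1) - 9 * k * (k - 1) // 2   # first value written in the shell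
--     rp, cp = r - 2 * k, c - k             # coordinates within the shell
--     if cp == 0:
--         return s + rp                     # left edge (downward arm)
--     if rp == m - 1:
--         return s + m - 1 + cp             # bottom edge (rightward arm)
--     return s + 3 * m - 3 - rp             # diagonal edge (upward arm)
--
-- def solution(n):
--     return [_val(n, r, c) for r in range(n) for c in range(r + 1)]
-- ===== Notes on version B (the rewrite author's own statement) =====
-- stated objective: alternative
-- what changed: B does not simulate the snail walk at all: it computes each cell's value by a closed-form arithmetic formula (shell index k = min(c, r-c, n-1-r), shell start value 1 + 3k(n-1) - 9k(k-1)/2, then one of three edge formulas) and emits the lower-triangular cells directly in row-major order, replacing A's grid-filling walk plus full n-by-n scan.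
import Mathlib
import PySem

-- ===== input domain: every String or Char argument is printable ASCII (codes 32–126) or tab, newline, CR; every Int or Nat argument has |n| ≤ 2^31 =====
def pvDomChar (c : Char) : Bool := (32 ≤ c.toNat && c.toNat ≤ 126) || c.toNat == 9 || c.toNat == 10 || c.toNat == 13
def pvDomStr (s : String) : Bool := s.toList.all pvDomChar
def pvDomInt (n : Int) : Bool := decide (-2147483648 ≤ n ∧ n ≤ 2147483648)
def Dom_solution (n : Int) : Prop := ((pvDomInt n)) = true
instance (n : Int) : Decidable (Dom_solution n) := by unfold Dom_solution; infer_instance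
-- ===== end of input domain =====

-- B replaces A's snail-walk simulation and grid scan by a per-cell closed-form formula (objective: alternative).

-- ===== PORT A =====
def decreaseRow (loc : Int × Int) : Int × Int := (loc.1 + 1, loc.2)

def increaseCol (loc : Int × Int) : Int × Int := (loc.1, loc.2 + 1)

def increaseDiagonal (loc : Int × Int) : Int × Int := (loc.1 - 1, loc.2 - 1)

-- answer[r][c] = v ; total pyGetD/pySetD forms — exact because every write of the walk is in range (proved below)
def setCellA (ans : List (List Int)) (loc : Int × Int) (v : Int) : List (List Int) :=
  PySem.List.pySetD ans loc.1 (PySem.List.pySetD (PySem.List.pyGetD ans loc.1 []) loc.2 v)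

-- the inner 'while count:' — count comes from range(n, 0, -1) so it is positive and the loop runs count.toNat times
def armA : Nat → (List (List Int) × (Int × Int) × Int) → Int → List (List Int) × (Int × Int) × Int
  | 0, st, _ => st
  | k + 1, (ans, loc, v), d =>
      let loc' := if d = 0 then decreaseRow loc else if d = 1 then increaseCol loc else increaseDiagonal loc
      armA k (setCellA ans loc' v, loc', v + 1) d

def solution (n : Int) : List Int :=
  let answer : List (List Int) := (PySem.List.pyRange 0 n 1).map (fun _ => List.replicate n.toNat 0)
  let countArr := PySem.List.pyRange n 0 (-1)
  let st := countArr.foldl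
    (fun (st : List (List Int) × (Int × Int) × Int × Int) count =>
      ((armA count.toNat (st.1, st.2.1, st.2.2.1) st.2.2.2).1,
        (armA count.toNat (st.1, st.2.1, st.2.2.1) st.2.2.2).2.1,
        (armA count.toNat (st.1, st.2.1, st.2.2.1) st.2.2.2).2.2,
        PySem.Int.mod (st.2.2.2 + 1) 3))
    (answer, (-1, 0), 1, 0)
  (PySem.List.pyRange 0 (PySem.List.len st.1) 1).foldl
    (fun res i =>
      (PySem.List.pyRange 0 (PySem.List.len st.1) 1).foldl
        (fun res j =>
          if PySem.List.pyGetD (PySem.List.pyGetD st.1 i []) j 0 ≠ 0 then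
            res ++ [PySem.List.pyGetD (PySem.List.pyGetD st.1 i []) j 0]
          else res)
        res)
    []

-- ===== PORT B =====
-- Source B's _val: closed-form value of the snail triangle at cell (r, c)
def snailVal (n r c : Int) : Int :=
  let k := min c (min (r - c) (n - 1 - r))
  let m := n - 3 * k
  let s := 1 + 3 * k * (n - 1) - PySem.Int.floordiv (9 * k * (k - 1)) 2
  let rp := r - 2 * k
  let cp := c - k
  if cp = 0 then s + rp
  else if rp = m - 1 then s + m - 1 + cp
  else s + 3 * m - 3 - rp

def solution_alt (n : Int) : List Int :=
  (PySem.List.pyRange 0 n 1).flatMap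
    (fun r => (PySem.List.pyRange 0 (r + 1) 1).map (fun c => snailVal n r c))

-- ===== PRECONDITION & SPEC =====
def Spec_solution (n : Int) (out : List Int) : Prop := out = solution_alt n
instance (n : Int) (out : List Int) : Decidable (Spec_solution n out) := by unfold Spec_solution; infer_instance

-- ===== CLAIM (what is proved, stated in full; the proofs are below) =====
def Claim_equal_solution : Prop := ∀ (n : Int), Dom_solution n → Spec_solution n (solution n)

-- ===== LEMMAS AND PROOFS =====

-- The direction vector A's three helpers add to the location, in the order the branches test the direction.
def deltaMove (d : Int) : Int × Int := if d = 0 then (1, 0) else if d = 1 then (0, 1) else (-1, -1)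

-- Pure description of one arm of the walk: the list of (cell, value) writes plus the final location and value.
def walkArm : Nat → (Int × Int) → Int → (Int × Int) → List ((Int × Int) × Int) × (Int × Int) × Int
  | 0, loc, v, _ => ([], loc, v)
  | k + 1, loc, v, e =>
      let r := walkArm k (loc.1 + e.1, loc.2 + e.2) (v + 1) e
      (((loc.1 + e.1, loc.2 + e.2), v) :: r.1, r.2)

-- Pure description of the whole walk over the list of arm lengths, cycling the direction.
def walkAux : List Int → (Int × Int) → Int → Int → List ((Int × Int) × Int) × (Int × Int) × Int
  | [], loc, v, _ => ([], loc, v)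
  | c :: cs, loc, v, d =>
      let a := walkArm c.toNat loc v (deltaMove d)
      let r := walkAux cs a.2.1 a.2.2 (PySem.Int.mod (d + 1) 3)
      (a.1 ++ r.1, r.2)

def applyWrites (g : List (List Int)) (ws : List ((Int × Int) × Int)) : List (List Int) :=
  ws.foldl (fun g w => setCellA g w.1 w.2) g

def dictOf (d : PySem.Dict (Int × Int) Int) (ws : List ((Int × Int) × Int)) :
    PySem.Dict (Int × Int) Int :=
  ws.foldl (fun d w => d.insert w.1 w.2) d

-- last-write-wins lookup in a write list
def wget : List ((Int × Int) × Int) → (Int × Int) → Option Int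
  | [], _ => none
  | w :: ws, q => match wget ws q with
      | some v => some v
      | none => if w.1 = q then some w.2 else none

def getCell (g : List (List Int)) (i j : Int) : Int :=
  PySem.List.pyGetD (PySem.List.pyGetD g i []) j 0

def GridN (N : Nat) (g : List (List Int)) : Prop :=
  g.length = N ∧ ∀ row ∈ g, row.length = N

def InRangeW (n : Int) (w : (Int × Int) × Int) : Prop :=
  0 ≤ w.1.1 ∧ w.1.1 < n ∧ 0 ≤ w.1.2 ∧ w.1.2 < n

theorem walkArm_spec (k : Nat) (loc : Int × Int) (v : Int) (e : Int × Int) :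
    walkArm k loc v e =
      ((List.range k).map
          (fun (j : Nat) => ((loc.1 + ((j : Int) + 1) * e.1, loc.2 + ((j : Int) + 1) * e.2), v + (j : Int))),
        (loc.1 + (k : Int) * e.1, loc.2 + (k : Int) * e.2), v + (k : Int)) := by
  induction k generalizing loc v with
  | zero => simp [walkArm]
  | succ k ih =>
    rw [walkArm, ih, List.range_succ_eq_map]
    simp only [List.map_cons, List.map_map, Prod.mk.injEq]
    and_intros
    · congr 1
      · simp only [Prod.mk.injEq]
        and_intros <;> (push_cast; ring)
      · apply List.map_congr_left
        intro j hj
        simp only [Function.comp_apply, Prod.mk.injEq]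
        and_intros <;> (push_cast; ring)
    · push_cast; ring
    · push_cast; ring
    · push_cast; ring

theorem armA_eq (k : Nat) (ans : List (List Int)) (loc : Int × Int) (v d : Int) :
    armA k (ans, loc, v) d =
      (applyWrites ans (walkArm k loc v (deltaMove d)).1, (walkArm k loc v (deltaMove d)).2) := by
  induction k generalizing ans loc v with
  | zero => simp [armA, walkArm, applyWrites]
  | succ k ih =>
    have hloc : (if d = 0 then decreaseRow loc else if d = 1 then increaseCol loc else increaseDiagonal loc)
        = (loc.1 + (deltaMove d).1, loc.2 + (deltaMove d).2) := by
      unfold deltaMove decreaseRow increaseCol increaseDiagonal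
      split_ifs <;> simp [Prod.mk.injEq] <;> omega
    rw [armA, hloc, ih, walkArm]
    simp [applyWrites]

theorem foldA_eq (cs : List Int) (ans : List (List Int)) (loc : Int × Int) (v d : Int) :
    (cs.foldl
      (fun (st : List (List Int) × (Int × Int) × Int × Int) count =>
        ((armA count.toNat (st.1, st.2.1, st.2.2.1) st.2.2.2).1,
          (armA count.toNat (st.1, st.2.1, st.2.2.1) st.2.2.2).2.1,
          (armA count.toNat (st.1, st.2.1, st.2.2.1) st.2.2.2).2.2,
          PySem.Int.mod (st.2.2.2 + 1) 3))
      (ans, loc, v, d)).1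
      = applyWrites ans (walkAux cs loc v d).1 := by
  induction cs generalizing ans loc v d with
  | nil => simp [walkAux, applyWrites]
  | cons c cs ih =>
    rw [List.foldl_cons]
    have hstep :
        ((armA c.toNat (ans, loc, v) d).1,
          (armA c.toNat (ans, loc, v) d).2.1,
          (armA c.toNat (ans, loc, v) d).2.2,
          PySem.Int.mod (d + 1) 3)
        = (applyWrites ans (walkArm c.toNat loc v (deltaMove d)).1,
            (walkArm c.toNat loc v (deltaMove d)).2.1,
            (walkArm c.toNat loc v (deltaMove d)).2.2,
            PySem.Int.mod (d + 1) 3) := by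
      rw [armA_eq]
    simp only [hstep]
    rw [ih, walkAux]
    simp [applyWrites, List.foldl_append]

theorem walkAux_bounds (n : Int) :
    ∀ (mk : Nat) (m x y v : Int), m ≤ (mk : Int) → 0 ≤ x → 0 ≤ y → x + m ≤ n → y + m ≤ n → 1 ≤ v →
      ∀ w ∈ (walkAux (PySem.List.pyRange m 0 (-1)) (x - 1, y) v 0).1,
        InRangeW n w ∧ v ≤ w.2 := by
  intro mk
  induction mk with
  | zero =>
    intro m x y v hm hx hy hxn hyn hv w hw
    rw [PySem.List.pyRange_neg_one_eq_nil (by omega)] at hw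
    simp [walkAux] at hw
  | succ mk ih =>
    intro m x y v hm hx hy hxn hyn hv w hw
    by_cases hm0 : m ≤ 0
    · rw [PySem.List.pyRange_neg_one_eq_nil (by omega)] at hw
      simp [walkAux] at hw
    rw [not_le] at hm0
    by_cases hm3 : 3 ≤ m
    · -- three arms then the inner triangle
      rw [PySem.List.pyRange_neg_one_cons (by omega), PySem.List.pyRange_neg_one_cons (by omega),
        PySem.List.pyRange_neg_one_cons (by omega)] at hw
      simp only [walkAux, walkArm_spec] at hw
      have d0 : deltaMove 0 = ((1 : Int), (0 : Int)) := by decide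
      have hmod1 : PySem.Int.mod ((0 : Int) + 1) 3 = 1 := by decide
      have hmod2 : PySem.Int.mod ((1 : Int) + 1) 3 = 2 := by decide
      have hmod3 : PySem.Int.mod ((2 : Int) + 1) 3 = 0 := by decide
      have d1 : deltaMove 1 = ((0 : Int), (1 : Int)) := by decide
      have d2 : deltaMove 2 = ((-1 : Int), (-1 : Int)) := by decide
      have hc1 : ((m.toNat : Nat) : Int) = m := Int.toNat_of_nonneg (by omega)
      have hc2 : (((m - 1).toNat : Nat) : Int) = m - 1 := Int.toNat_of_nonneg (by omega)
      have hc3 : (((m - 1 - 1).toNat : Nat) : Int) = m - 1 - 1 := Int.toNat_of_nonneg (by omega)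
      simp only [d0, hmod1, hmod2, hmod3, d1, d2, hc1, hc2, hc3, List.mem_append] at hw
      rcases hw with h | h | h | h
      · obtain ⟨j, hj, rfl⟩ := List.mem_map.1 h
        rw [List.mem_range] at hj
        simp only [InRangeW]
        omega
      · obtain ⟨j, hj, rfl⟩ := List.mem_map.1 h
        rw [List.mem_range] at hj
        simp only [InRangeW]
        omega
      · obtain ⟨j, hj, rfl⟩ := List.mem_map.1 h
        rw [List.mem_range] at hj
        simp only [InRangeW]
        omega
      · have hrec := ih (m - 1 - 1 - 1) (x + 2) (y + 1) (v + m + (m - 1) + (m - 1 - 1))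
          (by omega) (by omega) (by omega) (by omega) (by omega) (by omega) w ?_
        · exact ⟨hrec.1, by omega⟩
        · convert h using 4 <;> omega
    · -- m = 1 or m = 2
      by_cases hm1 : m = 1
      · subst hm1
        rw [PySem.List.pyRange_neg_one_cons (by norm_num),
          PySem.List.pyRange_neg_one_eq_nil (by norm_num)] at hw
        simp [walkAux, walkArm, deltaMove] at hw
        subst hw
        simp only [InRangeW]
        omega
      · have hm2 : m = 2 := by omega
        subst hm2
        rw [PySem.List.pyRange_neg_one_cons (by norm_num),
          PySem.List.pyRange_neg_one_cons (by norm_num),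
          PySem.List.pyRange_neg_one_eq_nil (by norm_num)] at hw
        simp [walkAux, walkArm, deltaMove] at hw
        rcases hw with hw | hw | hw <;> subst hw <;> simp only [InRangeW] <;> omega

theorem GridN_setCellA (N : Nat) (g : List (List Int)) (hg : GridN N g) (loc : Int × Int) (v : Int)
    (h1 : 0 ≤ loc.1) (h2 : loc.1 < (N : Int)) : GridN N (setCellA g loc v) := by
  obtain ⟨hlen, hrow⟩ := hg
  unfold setCellA
  rw [PySem.List.pySetD_of_nonneg _ _ h1]
  constructor
  · simp [hlen]
  · intro row hr
    rcases List.mem_or_eq_of_mem_set hr with h | h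
    · exact hrow _ h
    · subst h
      rw [PySem.List.length_pySetD]
      rw [PySem.List.pyGetD_eq_getElem _ _ h1 (by omega)]
      exact hrow _ (List.getElem_mem _)

theorem getCell_setCellA (N : Nat) (g : List (List Int)) (hg : GridN N g) (loc : Int × Int) (v i j : Int)
    (ha : 0 ≤ loc.1) (ha' : loc.1 < (N : Int)) (hb : 0 ≤ loc.2) (hb' : loc.2 < (N : Int))
    (hi : 0 ≤ i) (hi' : i < (N : Int)) (hj : 0 ≤ j) (hj' : j < (N : Int)) :
    getCell (setCellA g loc v) i j = if i = loc.1 ∧ j = loc.2 then v else getCell g i j := by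
  obtain ⟨hlen, hrow⟩ := hg
  have hga : loc.1.toNat < g.length := by omega
  have hgi : i.toNat < g.length := by omega
  have hrowlen : (g[loc.1.toNat]'hga).length = N := hrow _ (List.getElem_mem _)
  have hrowleni : (g[i.toNat]'hgi).length = N := hrow _ (List.getElem_mem _)
  unfold setCellA getCell
  rw [PySem.List.pySetD_of_nonneg _ _ ha,
    PySem.List.pyGetD_eq_getElem _ _ ha (by omega),
    PySem.List.pySetD_of_nonneg _ _ hb]
  rw [PySem.List.pyGetD_eq_getElem _ _ hi (by simp; omega)]
  rw [List.getElem_set]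
  by_cases hia : i = loc.1
  · rw [if_pos (by omega)]
    rw [PySem.List.pyGetD_eq_getElem _ _ hj (by simp [hrowlen]; omega)]
    rw [List.getElem_set]
    rw [PySem.List.pyGetD_eq_getElem _ _ hi (by omega),
      PySem.List.pyGetD_eq_getElem _ _ hj (by simp [hrowleni]; omega)]
    subst hia
    by_cases hjb : j = loc.2
    · rw [if_pos (by omega), if_pos ⟨rfl, hjb⟩]
    · rw [if_neg (by omega), if_neg (by tauto)]
  · rw [if_neg (by omega), if_neg (by tauto)]
    rw [PySem.List.pyGetD_eq_getElem _ _ hi (by omega)]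

theorem GridN_applyWrites (N : Nat) (ws : List ((Int × Int) × Int)) (g : List (List Int))
    (hg : GridN N g) (hws : ∀ w ∈ ws, InRangeW (N : Int) w) : GridN N (applyWrites g ws) := by
  induction ws generalizing g with
  | nil => simpa [applyWrites] using hg
  | cons wh wt ih =>
    have hwh := hws wh (by simp)
    simp only [InRangeW] at hwh
    simp only [applyWrites, List.foldl_cons] at *
    exact ih (setCellA g wh.1 wh.2) (GridN_setCellA N g hg wh.1 wh.2 hwh.1 hwh.2.1)
      (fun w hw => hws w (by simp [hw]))

theorem applyWrites_snoc (g : List (List Int)) (ws : List ((Int × Int) × Int))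
    (w : (Int × Int) × Int) :
    applyWrites g (ws ++ [w]) = setCellA (applyWrites g ws) w.1 w.2 := by
  simp [applyWrites, List.foldl_append]

theorem dictOf_snoc (d : PySem.Dict (Int × Int) Int) (ws : List ((Int × Int) × Int))
    (w : (Int × Int) × Int) :
    dictOf d (ws ++ [w]) = (dictOf d ws).insert w.1 w.2 := by
  simp [dictOf, List.foldl_append]

theorem applyWrites_getCell (N : Nat) (ws : List ((Int × Int) × Int)) (g : List (List Int))
    (hg : GridN N g) (hws : ∀ w ∈ ws, InRangeW (N : Int) w) (i j : Int)
    (hi : 0 ≤ i) (hi' : i < (N : Int)) (hj : 0 ≤ j) (hj' : j < (N : Int)) :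
    getCell (applyWrites g ws) i j = (dictOf PySem.Dict.empty ws).getD (i, j) (getCell g i j) := by
  induction ws using List.reverseRecOn generalizing g with
  | nil => simp [applyWrites, dictOf, PySem.Dict.getD_empty]
  | append_singleton wt wh ih =>
    have hwt : ∀ w ∈ wt, InRangeW (N : Int) w := fun w hw => hws w (by simp [hw])
    have hwh := hws wh (by simp)
    simp only [InRangeW] at hwh
    have hgrid := GridN_applyWrites N wt g hg hwt
    rw [applyWrites_snoc, dictOf_snoc]
    rw [getCell_setCellA N _ hgrid wh.1 wh.2 i j hwh.1 hwh.2.1 hwh.2.2.1 hwh.2.2.2 hi hi' hj hj']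
    rw [PySem.Dict.getD_insert]
    rw [ih g hg hwt]
    by_cases hc : i = wh.1.1 ∧ j = wh.1.2
    · rw [if_pos hc, if_pos (by simp [Prod.ext_iff]; exact hc)]
    · rw [if_neg hc, if_neg (by intro hEq; apply hc; rw [Prod.ext_iff] at hEq; simpa using hEq)]

theorem wget_snoc (l : List ((Int × Int) × Int)) (w : (Int × Int) × Int) (q : Int × Int) :
    wget (l ++ [w]) q = if w.1 = q then some w.2 else wget l q := by
  induction l with
  | nil => simp [wget]
  | cons x l ih =>
    simp only [List.cons_append, wget, ih]
    rcases h : wget l q with _ | v <;> split_ifs <;> simp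

theorem wget_append (l1 l2 : List ((Int × Int) × Int)) (q : Int × Int) :
    wget (l1 ++ l2) q = (wget l2 q).or (wget l1 q) := by
  induction l1 with
  | nil => simp [wget]
  | cons w l1 ih =>
    simp only [List.cons_append, wget, ih]
    rcases h : wget l2 q with _ | v <;> rcases hw : wget l1 q with _ | v' <;> simp

-- getD of the accumulated dict is the last-write-wins lookup wget
theorem getD_dictOf (ws : List ((Int × Int) × Int)) (d : PySem.Dict (Int × Int) Int)
    (q : Int × Int) (dflt : Int) :
    (dictOf d ws).getD q dflt = match wget ws q with | some v => v | none => d.getD q dflt := by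
  induction ws using List.reverseRecOn generalizing d with
  | nil => simp [dictOf, wget]
  | append_singleton wt wh ih =>
    rw [dictOf_snoc, PySem.Dict.getD_insert, ih, wget_snoc]
    by_cases h : wh.1 = q
    · simp [h]
    · rw [if_neg h, if_neg (fun hc => h hc.symm)]

theorem wget_mem (ws : List ((Int × Int) × Int)) (q : Int × Int) (v : Int)
    (h : wget ws q = some v) : (q, v) ∈ ws := by
  induction ws with
  | nil => simp [wget] at h
  | cons w wt ih =>
    rw [wget] at h
    rcases hw : wget wt q with _ | v'
    · rw [hw] at h
      split_ifs at h with hq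
      · cases h
        rcases w with ⟨c, val⟩
        cases hq
        simp
    · rw [hw] at h
      cases h
      exact List.mem_cons_of_mem _ (ih hw)

-- ----- lookup in each straight arm of the walk -----

theorem wget_arm_down (k : Nat) (x0 y0 v a b : Int) :
    wget ((List.range k).map
        (fun (j : Nat) => ((x0 + ((j : Int) + 1) * 1, y0 + ((j : Int) + 1) * 0), v + (j : Int)))) (a, b)
      = if b = y0 ∧ x0 + 1 ≤ a ∧ a < x0 + 1 + k then some (v + (a - x0 - 1)) else none := by
  induction k with
  | zero =>
    simp only [List.range_zero, List.map_nil, wget, Nat.cast_zero]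
    rw [if_neg (by omega)]
  | succ k ih =>
    rw [List.range_succ, List.map_append, List.map_cons, List.map_nil, wget_snoc, ih]
    by_cases hq : ((x0 + ((k : Int) + 1) * 1, y0 + ((k : Int) + 1) * 0) : Int × Int) = (a, b)
    · rw [if_pos hq]
      rw [Prod.mk.injEq] at hq
      rw [if_pos (by push_cast; omega)]
      congr 1
      omega
    · rw [if_neg hq]
      rw [Prod.mk.injEq] at hq
      by_cases hc : b = y0 ∧ x0 + 1 ≤ a ∧ a < x0 + 1 + (k : Int)
      · rw [if_pos hc, if_pos (by push_cast; omega)]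
      · rw [if_neg hc, if_neg (by push_cast at hq ⊢; omega)]

theorem wget_arm_right (k : Nat) (x0 y0 v a b : Int) :
    wget ((List.range k).map
        (fun (j : Nat) => ((x0 + ((j : Int) + 1) * 0, y0 + ((j : Int) + 1) * 1), v + (j : Int)))) (a, b)
      = if a = x0 ∧ y0 + 1 ≤ b ∧ b < y0 + 1 + k then some (v + (b - y0 - 1)) else none := by
  induction k with
  | zero =>
    simp only [List.range_zero, List.map_nil, wget, Nat.cast_zero]
    rw [if_neg (by omega)]
  | succ k ih =>
    rw [List.range_succ, List.map_append, List.map_cons, List.map_nil, wget_snoc, ih]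
    by_cases hq : ((x0 + ((k : Int) + 1) * 0, y0 + ((k : Int) + 1) * 1) : Int × Int) = (a, b)
    · rw [if_pos hq]
      rw [Prod.mk.injEq] at hq
      rw [if_pos (by push_cast; omega)]
      congr 1
      omega
    · rw [if_neg hq]
      rw [Prod.mk.injEq] at hq
      by_cases hc : a = x0 ∧ y0 + 1 ≤ b ∧ b < y0 + 1 + (k : Int)
      · rw [if_pos hc, if_pos (by push_cast; omega)]
      · rw [if_neg hc, if_neg (by push_cast at hq ⊢; omega)]

theorem wget_arm_diag (k : Nat) (x0 y0 v a b : Int) :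
    wget ((List.range k).map
        (fun (j : Nat) => ((x0 + ((j : Int) + 1) * (-1), y0 + ((j : Int) + 1) * (-1)), v + (j : Int)))) (a, b)
      = if a - x0 = b - y0 ∧ x0 - k ≤ a ∧ a ≤ x0 - 1 then some (v + (x0 - a - 1)) else none := by
  induction k with
  | zero =>
    simp only [List.range_zero, List.map_nil, wget, Nat.cast_zero]
    rw [if_neg (by omega)]
  | succ k ih =>
    rw [List.range_succ, List.map_append, List.map_cons, List.map_nil, wget_snoc, ih]
    by_cases hq : ((x0 + ((k : Int) + 1) * (-1), y0 + ((k : Int) + 1) * (-1)) : Int × Int) = (a, b)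
    · rw [if_pos hq]
      rw [Prod.mk.injEq] at hq
      rw [if_pos (by push_cast; omega)]
      congr 1
      omega
    · rw [if_neg hq]
      rw [Prod.mk.injEq] at hq
      by_cases hc : a - x0 = b - y0 ∧ x0 - (k : Int) ≤ a ∧ a ≤ x0 - 1
      · rw [if_pos hc, if_pos (by push_cast; omega)]
      · rw [if_neg hc, if_neg (by push_cast at hq ⊢; omega)]

-- ----- closed-form facts about snailVal -----

theorem snailVal_left (m r : Int) (h0 : 0 ≤ r) (h1 : r < m) : snailVal m r 0 = 1 + r := by
  have hk : min (0 : Int) (min (r - 0) (m - 1 - r)) = 0 := by omega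
  simp only [snailVal, hk]
  norm_num [PySem.Int.floordiv]

theorem snailVal_bottom (m c : Int) (h0 : 1 ≤ c) (h1 : c ≤ m - 1) :
    snailVal m (m - 1) c = m + c := by
  have hk : min c (min (m - 1 - c) (m - 1 - (m - 1))) = 0 := by omega
  simp only [snailVal, hk]
  norm_num [PySem.Int.floordiv]

theorem snailVal_diag (m r : Int) (h0 : 1 ≤ r) (h1 : r ≤ m - 2) :
    snailVal m r r = 3 * m - 2 - r := by
  have hk : min r (min (r - r) (m - 1 - r)) = 0 := by omega
  simp only [snailVal, hk]
  norm_num [PySem.Int.floordiv]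
  split_ifs <;> omega

theorem snailVal_step (m r c : Int) (h1 : 1 ≤ c) (h2 : c < r) (h3 : r < m - 1) :
    snailVal m r c = 3 * m - 3 + snailVal (m - 3) (r - 2) (c - 1) := by
  have hk1 : 1 ≤ min c (min (r - c) (m - 1 - r)) := by omega
  have hkin : min (c - 1) (min ((r - 2) - (c - 1)) ((m - 3) - 1 - (r - 2)))
      = min c (min (r - c) (m - 1 - r)) - 1 := by omega
  set k := min c (min (r - c) (m - 1 - r)) with hkdef
  simp only [snailVal, hkin, ← hkdef]
  have hfd : PySem.Int.floordiv (9 * k * (k - 1)) 2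
      = PySem.Int.floordiv (9 * (k - 1) * ((k - 1) - 1)) 2 + 9 * (k - 1) := by
    rw [PySem.Int.floordiv_eq_ediv_of_pos (by norm_num),
      PySem.Int.floordiv_eq_ediv_of_pos (by norm_num)]
    have h9 : 9 * k * (k - 1) = 9 * (k - 1) * ((k - 1) - 1) + 9 * (k - 1) * 2 := by ring
    rw [h9, Int.add_mul_ediv_right _ _ (by norm_num : (2:Int) ≠ 0)]
  have hcp : c - 1 - (k - 1) = c - k := by ring
  have hrp : r - 2 - 2 * (k - 1) = r - 2 * k := by ring
  have hm : m - 3 - 3 * (k - 1) = m - 3 * k := by ring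
  rw [hcp, hrp, hm, hfd]
  split_ifs with hA hB
  · nlinarith [hfd]
  · nlinarith [hfd]
  · nlinarith [hfd]

-- ----- full characterization of the walk's writes -----

theorem walk_wget (mkb : Nat) : ∀ (m x y v : Int), m ≤ (mkb : Int) →
    ∀ a b : Int,
      wget (walkAux (PySem.List.pyRange m 0 (-1)) (x - 1, y) v 0).1 (a, b)
        = if 0 ≤ b - y ∧ b - y ≤ a - x ∧ a - x < m
          then some (v - 1 + snailVal m (a - x) (b - y)) else none := by
  induction mkb with
  | zero =>
    intro m x y v hm a b
    rw [PySem.List.pyRange_neg_one_eq_nil (by omega)]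
    simp only [walkAux, wget]
    rw [if_neg (by omega)]
  | succ mkb ih =>
    intro m x y v hm a b
    by_cases hm0 : m ≤ 0
    · rw [PySem.List.pyRange_neg_one_eq_nil (by omega)]
      simp only [walkAux, wget]
      rw [if_neg (by omega)]
    rw [not_le] at hm0
    have d0 : deltaMove 0 = ((1 : Int), (0 : Int)) := by decide
    have hmod1 : PySem.Int.mod ((0 : Int) + 1) 3 = 1 := by decide
    have hmod2 : PySem.Int.mod ((1 : Int) + 1) 3 = 2 := by decide
    have hmod3 : PySem.Int.mod ((2 : Int) + 1) 3 = 0 := by decide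
    have d1 : deltaMove 1 = ((0 : Int), (1 : Int)) := by decide
    have d2 : deltaMove 2 = ((-1 : Int), (-1 : Int)) := by decide
    have hc1 : ((m.toNat : Nat) : Int) = m := Int.toNat_of_nonneg (by omega)
    by_cases hm3 : 3 ≤ m
    · rw [PySem.List.pyRange_neg_one_cons (by omega), PySem.List.pyRange_neg_one_cons (by omega),
        PySem.List.pyRange_neg_one_cons (by omega)]
      simp only [walkAux, walkArm_spec, d0, hmod1, hmod2, hmod3, d1, d2]
      have hc2 : (((m - 1).toNat : Nat) : Int) = m - 1 := Int.toNat_of_nonneg (by omega)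
      have hc3 : (((m - 1 - 1).toNat : Nat) : Int) = m - 1 - 1 := Int.toNat_of_nonneg (by omega)
      have e1 : x - 1 + (m.toNat : Int) * 1 + ((m - 1).toNat : Int) * 0 + ((m - 1 - 1).toNat : Int) * (-1)
          = x + 2 - 1 := by rw [hc1, hc2, hc3]; ring
      have e2 : y + (m.toNat : Int) * 0 + ((m - 1).toNat : Int) * 1 + ((m - 1 - 1).toNat : Int) * (-1)
          = y + 1 := by rw [hc1, hc2, hc3]; ring
      have e3 : v + (m.toNat : Int) + ((m - 1).toNat : Int) + ((m - 1 - 1).toNat : Int)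
          = v + 3 * m - 3 := by rw [hc1, hc2, hc3]; ring
      have e4 : m - 1 - 1 - 1 = m - 3 := by ring
      rw [e1, e2, e3, e4]
      have hinner := ih (m - 3) (x + 2) (y + 1) (v + 3 * m - 3) (by omega) a b
      rw [wget_append, wget_append, wget_append, hinner,
        wget_arm_down, wget_arm_right, wget_arm_diag]
      simp only [hc1, hc2, hc3]
      split_ifs <;>
        simp only [Option.some_or, Option.none_or] <;>
        first
        | rfl
        | (exfalso; omega)
        | (refine congr_arg some ?_
           first
           | (rw [show b - y = (0 : Int) from by omega]
              have := snailVal_left m (a - x) (by omega) (by omega); linarith)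
           | (rw [show a - x = m - 1 from by omega]
              have := snailVal_bottom m (b - y) (by omega) (by omega); linarith)
           | (rw [show b - y = a - x from by omega]
              have := snailVal_diag m (a - x) (by omega) (by omega); linarith)
           | (rw [show a - (x + 2) = a - x - 2 from by ring,
                show b - (y + 1) = b - y - 1 from by ring]
              have := snailVal_step m (a - x) (b - y) (by omega) (by omega) (by omega); linarith))
    · by_cases hm1 : m = 1
      · subst hm1
        rw [PySem.List.pyRange_neg_one_cons (by norm_num),
          PySem.List.pyRange_neg_one_eq_nil (by norm_num)]
        simp only [walkAux, walkArm_spec, d0, List.append_nil]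
        rw [wget_arm_down]
        simp only [Int.toNat_one, Nat.cast_one]
        split_ifs <;>
          first
          | rfl
          | (exfalso; omega)
          | (refine congr_arg some ?_
             rw [show b - y = (0 : Int) from by omega]
             have := snailVal_left 1 (a - x) (by omega) (by omega); linarith)
      · have hm2 : m = 2 := by omega
        subst hm2
        rw [PySem.List.pyRange_neg_one_cons (by norm_num),
          PySem.List.pyRange_neg_one_cons (by norm_num),
          PySem.List.pyRange_neg_one_eq_nil (by norm_num)]
        simp only [walkAux, walkArm_spec, d0, d1, hmod1, List.append_nil]
        rw [wget_append, wget_arm_down, wget_arm_right]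
        norm_num
        split_ifs <;>
          simp only [Option.some_or, Option.none_or] <;>
          first
          | rfl
          | (exfalso; omega)
          | (refine congr_arg some ?_
             first
             | (rw [show b - y = (0 : Int) from by omega]
                have := snailVal_left 2 (a - x) (by omega) (by omega); linarith)
             | (rw [show a - x = (1 : Int) from by omega, show (1 : Int) = 2 - 1 from rfl]
                have := snailVal_bottom 2 (b - y) (by omega) (by omega); linarith))

-- n ≤ 0 : both sides are empty
theorem solution_eq_zero (n : Int) (h : n ≤ 0) : solution n = solution_alt n := by
  have h1 : PySem.List.pyRange n 0 (-1) = [] := PySem.List.pyRange_neg_one_eq_nil h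
  have h2 : PySem.List.pyRange 0 n 1 = [] := PySem.List.pyRange_one_eq_nil h
  have h4 : PySem.List.pyRange 0 (0 : Int) 1 = [] := by decide
  simp [solution, solution_alt, h1, h2, h4]

theorem solution_eq_pos (n : Int) (hn : 0 < n) : solution n = solution_alt n := by
  have hN : ((n.toNat : Nat) : Int) = n := Int.toNat_of_nonneg (by omega)
  simp only [solution]
  rw [foldA_eq]
  set ws := (walkAux (PySem.List.pyRange n 0 (-1)) (-1, 0) 1 0).1 with hwsdef
  set g0 : List (List Int) := (PySem.List.pyRange 0 n 1).map (fun _ => List.replicate n.toNat 0)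
    with hg0def
  have hbounds : ∀ w ∈ ws, InRangeW n w ∧ 1 ≤ w.2 := by
    have h := walkAux_bounds n n.toNat n 0 0 1 (by omega) le_rfl le_rfl (by omega) (by omega) le_rfl
    simpa [hwsdef] using h
  have hwget : ∀ a b : Int,
      wget ws (a, b) = if 0 ≤ b ∧ b ≤ a ∧ a < n then some (snailVal n a b) else none := by
    intro a b
    have h := walk_wget n.toNat n 0 0 1 (by omega) a b
    norm_num at h
    simpa [hwsdef] using h
  have hwre : ∀ w ∈ ws, InRangeW ((n.toNat : Nat) : Int) w := by
    rw [hN]; exact fun w hw => (hbounds w hw).1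
  have hGg0 : GridN n.toNat g0 := by
    constructor
    · simp [hg0def, PySem.List.length_pyRange_one]
    · intro row hr
      rw [hg0def] at hr
      simp only [List.mem_map] at hr
      obtain ⟨_, _, rfl⟩ := hr
      simp
  have hGans : GridN n.toNat (applyWrites g0 ws) := GridN_applyWrites _ _ _ hGg0 hwre
  have hlenans : PySem.List.len (applyWrites g0 ws) = n := by
    rw [PySem.List.len_eq, hGans.1, hN]
  have h0 : ∀ i j : Int, 0 ≤ i → i < n → 0 ≤ j → j < n → getCell g0 i j = 0 := by
    intro i j h1 h2 h3 h4
    unfold getCell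
    rw [hg0def]
    rw [PySem.List.pyGetD_eq_getElem _ _ h1
      (by simp only [List.length_map, PySem.List.length_pyRange_one]; omega)]
    rw [List.getElem_map]
    rw [PySem.List.pyGetD_eq_getElem _ _ h3 (by simp; omega)]
    simp
  have hpos1 : ∀ i j : Int, 0 ≤ j → j ≤ i → i < n → 1 ≤ snailVal n i j := by
    intro i j h1 h2 h3
    have hw : wget ws (i, j) = some (snailVal n i j) := by
      rw [hwget, if_pos (by omega)]
    exact (hbounds _ (wget_mem ws (i, j) _ hw)).2
  have hcell : ∀ i j : Int, 0 ≤ i → i < n → 0 ≤ j → j < n →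
      PySem.List.pyGetD (PySem.List.pyGetD (applyWrites g0 ws) i []) j 0
        = if j ≤ i then snailVal n i j else 0 := by
    intro i j h1 h2 h3 h4
    have hc := applyWrites_getCell n.toNat ws g0 hGg0 hwre i j h1 (by omega) h3 (by omega)
    rw [h0 i j h1 h2 h3 h4, getD_dictOf, hwget i j] at hc
    simp only [getCell] at hc
    by_cases hji : j ≤ i
    · rw [hc, if_pos (show 0 ≤ j ∧ j ≤ i ∧ i < n by omega), if_pos hji]
    · rw [hc, if_neg (show ¬ (0 ≤ j ∧ j ≤ i ∧ i < n) by omega), if_neg hji]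
      simp
  rw [hlenans]
  have hinner : ∀ (res : List Int) (i : Int),
      List.foldl (fun res j =>
        if PySem.List.pyGetD (PySem.List.pyGetD (applyWrites g0 ws) i []) j 0 ≠ 0 then
          res ++ [PySem.List.pyGetD (PySem.List.pyGetD (applyWrites g0 ws) i []) j 0]
        else res) res (PySem.List.pyRange 0 n 1)
      = res ++ ((PySem.List.pyRange 0 n 1).filter (fun j => decide
          (PySem.List.pyGetD (PySem.List.pyGetD (applyWrites g0 ws) i []) j 0 ≠ 0))).map
          (fun j => PySem.List.pyGetD (PySem.List.pyGetD (applyWrites g0 ws) i []) j 0) :=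
    fun res i => PySem.List.foldl_append_ite _ _ _ _
  simp only [hinner]
  rw [PySem.List.foldl_append_eq_flatMap]
  simp only [List.nil_append]
  have hrows : ∀ i ∈ PySem.List.pyRange 0 n 1,
      ((PySem.List.pyRange 0 n 1).filter (fun j => decide
          (PySem.List.pyGetD (PySem.List.pyGetD (applyWrites g0 ws) i []) j 0 ≠ 0))).map
          (fun j => PySem.List.pyGetD (PySem.List.pyGetD (applyWrites g0 ws) i []) j 0)
        = (PySem.List.pyRange 0 (i + 1) 1).map (fun c => snailVal n i c) := by
    intro i hi
    rw [PySem.List.mem_pyRange_one] at hi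
    rw [PySem.List.pyRange_one_append 0 (i + 1) n (by omega) (by omega), List.filter_append,
      List.map_append]
    have hkeep : (PySem.List.pyRange 0 (i + 1) 1).filter (fun j => decide
        (PySem.List.pyGetD (PySem.List.pyGetD (applyWrites g0 ws) i []) j 0 ≠ 0))
        = PySem.List.pyRange 0 (i + 1) 1 := by
      apply List.filter_eq_self.mpr
      intro j hj
      rw [PySem.List.mem_pyRange_one] at hj
      rw [decide_eq_true_iff]
      rw [hcell i j hi.1 hi.2 (by omega) (by omega), if_pos (by omega)]
      have := hpos1 i j (by omega) (by omega) (by omega)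
      omega
    have hdrop : (PySem.List.pyRange (i + 1) n 1).filter (fun j => decide
        (PySem.List.pyGetD (PySem.List.pyGetD (applyWrites g0 ws) i []) j 0 ≠ 0)) = [] := by
      apply List.filter_eq_nil_iff.mpr
      intro j hj
      rw [PySem.List.mem_pyRange_one] at hj
      simp only [decide_eq_true_iff, not_not]
      rw [hcell i j hi.1 hi.2 (by omega) (by omega), if_neg (by omega)]
    rw [hkeep, hdrop, List.map_nil, List.append_nil]
    apply List.map_congr_left
    intro j hj
    rw [PySem.List.mem_pyRange_one] at hj
    rw [hcell i j hi.1 hi.2 (by omega) (by omega), if_pos (by omega)]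
  rw [List.flatMap_congr hrows]
  rfl

-- ===== VERDICT (by name: the statement is the Claim_ definition above) =====
theorem solution_spec : Claim_equal_solution := by
  intro n _
  unfold Spec_solution
  rcases (by omega : n ≤ 0 ∨ 0 < n) with h | h
  · exact solution_eq_zero n h
  · exact solution_eq_pos n h
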